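-- pv_equiv track=rewrite | github.com/ayukyo/alltoolkit | Python/morse_utils/mod.py | get_morse_stats
-- ===== SOURCE A (Python) =====
-- from typing import Union, List, Tuple, Optional, Dict
--
-- def get_morse_stats(morse: str) -> Dict[str, int]:
--     """
--     获取摩尔斯电码统计信息
--
--     Args:
--         morse: 摩尔斯电码字符串
--
--     Returns:
--         统计信息字典
--
--     Example:
--         >>> get_morse_stats('... --- ...')
--         {'dots': 6, 'dashes': 3, 'letters': 3, 'words': 1}
--     """
--     dots = morse.count('.')
--     dashes = morse.count('-')
--
--     # 计算字母数（非空摩尔斯码元素）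
--     letters = len([m for m in morse.split() if m.strip('/')])
--
--     # 计算单词数
--     words = morse.count('/') + 1 if morse.strip() else 0
--
--     return {
--         'dots': dots,
--         'dashes': dashes,
--         'letters': letters,
--         'words': words,
--         'total_symbols': dots + dashes,
--     }
-- ===== SOURCE B (Python) =====
-- def get_morse_stats(morse: str):
--     dots = dashes = slashes = letters = 0
--     in_tok = has_ns = seen = False
--     for c in morse:
--         if c.isspace():
--             if in_tok and has_ns:
--                 letters += 1
--             in_tok = has_ns = False
--         else:
--             seen = True
--             in_tok = True
--             if c == '.':
--                 dots += 1
--             elif c == '-':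
--                 dashes += 1
--             if c == '/':
--                 slashes += 1
--             else:
--                 has_ns = True
--     if in_tok and has_ns:
--         letters += 1
--     words = slashes + 1 if seen else 0
--     return {
--         'dots': dots,
--         'dashes': dashes,
--         'letters': letters,
--         'words': words,
--         'total_symbols': dots + dashes,
--     }
-- ===== Notes on version B (the rewrite author's own statement) =====
-- stated objective: alternative
-- what changed: Replaced A's four separate string scans (two counts, split()+filter, strip()+count) by one single pass over the characters that maintains dot/dash/slash counters plus a current-token flag pair, finalizing a letter at each whitespace boundary.
import Mathlib
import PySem

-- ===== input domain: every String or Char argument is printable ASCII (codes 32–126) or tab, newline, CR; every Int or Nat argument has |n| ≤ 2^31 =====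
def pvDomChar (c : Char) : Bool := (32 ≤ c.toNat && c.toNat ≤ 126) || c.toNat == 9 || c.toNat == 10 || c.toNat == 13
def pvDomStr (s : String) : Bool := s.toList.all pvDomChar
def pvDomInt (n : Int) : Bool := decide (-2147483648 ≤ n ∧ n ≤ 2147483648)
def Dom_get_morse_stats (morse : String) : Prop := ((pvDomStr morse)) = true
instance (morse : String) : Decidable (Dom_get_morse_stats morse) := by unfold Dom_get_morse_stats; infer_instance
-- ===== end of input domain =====

-- B replaces A's four separate scans of the string by one single character pass with counters; alternative decomposition, same cost.

-- ===== PORT A =====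
def get_morse_stats (morse : String) : List (String × Int) :=
  let dots : Int := (PySem.Str.count morse "." : Int)
  let dashes : Int := (PySem.Str.count morse "-" : Int)
  let letters : Int :=
    (((PySem.Str.split₀ morse).filter (fun m => PySem.Str.stripChars m "/" != "")).length : Int)
  let words : Int :=
    if PySem.Str.strip morse != "" then (PySem.Str.count morse "/" : Int) + 1 else 0
  [("dots", dots), ("dashes", dashes), ("letters", letters), ("words", words),
   ("total_symbols", dots + dashes)]

-- ===== PORT B =====
structure MorseSt where
  dots : Int
  dashes : Int
  slashes : Int
  letters : Int
  inTok : Bool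
  hasNS : Bool
  seen : Bool
deriving Repr, DecidableEq

def morseStep (st : MorseSt) (c : Char) : MorseSt :=
  if PySem.Chars.isspace c then
    { st with letters := if st.inTok && st.hasNS then st.letters + 1 else st.letters,
              inTok := false, hasNS := false }
  else
    { st with seen := true, inTok := true,
              dots := if c == '.' then st.dots + 1 else st.dots,
              dashes := if c == '.' then st.dashes
                        else if c == '-' then st.dashes + 1 else st.dashes,
              slashes := if c == '/' then st.slashes + 1 else st.slashes,
              hasNS := if c == '/' then st.hasNS else true }

def get_morse_stats_alt (morse : String) : List (String × Int) :=
  let st := morse.toList.foldl morseStep ⟨0, 0, 0, 0, false, false, false⟩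
  let letters : Int := if st.inTok && st.hasNS then st.letters + 1 else st.letters
  let words : Int := if st.seen then st.slashes + 1 else 0
  [("dots", st.dots), ("dashes", st.dashes), ("letters", letters), ("words", words),
   ("total_symbols", st.dots + st.dashes)]

-- ===== PRECONDITION & SPEC =====
def Spec_get_morse_stats (morse : String) (out : List (String × Int)) : Prop := out = get_morse_stats_alt morse
instance (morse : String) (out : List (String × Int)) : Decidable (Spec_get_morse_stats morse out) := by unfold Spec_get_morse_stats; infer_instance

-- ===== CLAIM (what is proved, stated in full; the proofs are below) =====
def Claim_equal_get_morse_stats : Prop := ∀ (morse : String), Dom_get_morse_stats morse → Spec_get_morse_stats morse (get_morse_stats morse)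

-- ===== LEMMAS AND PROOFS =====

lemma dropWhile_forall_iff {α : Type} (p : α → Bool) (l : List α) :
    (∀ x ∈ List.dropWhile p l, p x) ↔ (∀ x ∈ l, p x) := by
  constructor
  · intro h x hx
    have hsplit : List.takeWhile p l ++ List.dropWhile p l = l :=
      List.takeWhile_append_dropWhile
    rw [← hsplit] at hx
    rcases List.mem_append.mp hx with h1 | h2
    · exact List.mem_takeWhile_imp h1
    · exact h x h2
  · intro h x hx
    exact h x ((List.dropWhile_sublist p).mem hx)

lemma isspace_dot : PySem.Chars.isspace '.' = false := by decide
lemma isspace_dash : PySem.Chars.isspace '-' = false := by decide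
lemma isspace_slash : PySem.Chars.isspace '/' = false := by decide

-- one step of Chars.count.go with a single-character needle
lemma count_go_step (c a : Char) (f acc : Nat) (t : List Char) :
    PySem.Chars.count.go [c] (f + 1) (a :: t) acc =
      if c = a then PySem.Chars.count.go [c] f t (acc + 1)
      else PySem.Chars.count.go [c] f t acc := by
  by_cases hac : c = a
  · subst hac; simp [PySem.Chars.count.go, List.isPrefixOf]
  · simp [PySem.Chars.count.go, List.isPrefixOf, hac]

lemma count_go_singleton (c : Char) (l : List Char) (fuel acc : Nat)
    (h : l.length ≤ fuel) :
    PySem.Chars.count.go [c] fuel l acc = acc + l.count c := by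
  induction l generalizing fuel acc with
  | nil => cases fuel <;> simp [PySem.Chars.count.go]
  | cons a t ih =>
      cases fuel with
      | zero => simp at h
      | succ f =>
          have hf : t.length ≤ f := by simpa using h
          rw [count_go_step]
          by_cases hac : c = a
          · rw [if_pos hac, ih f (acc + 1) hf, List.count_cons]
            subst hac
            simp
            omega
          · rw [if_neg hac, ih f acc hf, List.count_cons]
            have : ¬ a = c := fun h' => hac h'.symm
            simp [this]

-- Chars.count with a single-character needle is List.count
lemma count_singleton (l : List Char) (c : Char) :
    PySem.Chars.count l [c] = l.count c := by
  simpa [PySem.Chars.count] using count_go_singleton c l l.length 0 l.length.le_refl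

-- counter components of B's fold
lemma fold_dots (l : List Char) (st : MorseSt) :
    (l.foldl morseStep st).dots = st.dots + l.count '.' := by
  induction l generalizing st with
  | nil => simp
  | cons a t ih =>
      rw [List.foldl_cons, ih]
      have hd : (morseStep st a).dots = st.dots + if a = '.' then 1 else 0 := by
        unfold morseStep
        by_cases hsp : PySem.Chars.isspace a
        · have hne : ¬ a = '.' := by rintro rfl; exact absurd hsp (by decide)
          simp [hsp, hne]
        · by_cases ha : a = '.' <;> simp [hsp, ha, isspace_dot]
      rw [hd, List.count_cons]
      by_cases ha : a = '.' <;> simp [ha] <;> push_cast <;> try omega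

lemma fold_dashes (l : List Char) (st : MorseSt) :
    (l.foldl morseStep st).dashes = st.dashes + l.count '-' := by
  induction l generalizing st with
  | nil => simp
  | cons a t ih =>
      rw [List.foldl_cons, ih]
      have hd : (morseStep st a).dashes = st.dashes + if a = '-' then 1 else 0 := by
        unfold morseStep
        by_cases hsp : PySem.Chars.isspace a
        · have hne : ¬ a = '-' := by rintro rfl; exact absurd hsp (by decide)
          simp [hsp, hne]
        · by_cases ha : a = '-'
          · subst ha; simp [hsp, isspace_dash]
          · by_cases ha2 : a = '.' <;> simp [hsp, ha, ha2, isspace_dot]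
      rw [hd, List.count_cons]
      by_cases ha : a = '-' <;> simp [ha] <;> push_cast <;> try omega

lemma fold_slashes (l : List Char) (st : MorseSt) :
    (l.foldl morseStep st).slashes = st.slashes + l.count '/' := by
  induction l generalizing st with
  | nil => simp
  | cons a t ih =>
      rw [List.foldl_cons, ih]
      have hd : (morseStep st a).slashes = st.slashes + if a = '/' then 1 else 0 := by
        unfold morseStep
        by_cases hsp : PySem.Chars.isspace a
        · have hne : ¬ a = '/' := by rintro rfl; exact absurd hsp (by decide)
          simp [hsp, hne]
        · by_cases ha : a = '/' <;> simp [hsp, ha, isspace_slash]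
      rw [hd, List.count_cons]
      by_cases ha : a = '/' <;> simp [ha] <;> push_cast <;> try omega

lemma fold_seen (l : List Char) (st : MorseSt) :
    (l.foldl morseStep st).seen = (st.seen || l.any (fun c => !PySem.Chars.isspace c)) := by
  induction l generalizing st with
  | nil => simp
  | cons a t ih =>
      by_cases ha : PySem.Chars.isspace a
      · rw [List.foldl_cons, ih]
        simp [morseStep, ha]
      · rw [List.foldl_cons, ih]
        simp [morseStep, ha]

-- the token predicate of A's filter, on char lists
def Ptok (t : List Char) : Bool := PySem.Chars.stripChars t ['/'] != []

lemma stripChars_slash (t : List Char) :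
    PySem.Chars.stripChars t ['/'] = [] ↔ ∀ x ∈ t, x = '/' := by
  have hdef : PySem.Chars.stripChars t ['/'] =
      (List.dropWhile (fun c => (['/'] : List Char).contains c)
        ((List.dropWhile (fun c => (['/'] : List Char).contains c) t).reverse)).reverse := rfl
  rw [hdef, List.reverse_eq_nil_iff, List.dropWhile_eq_nil_iff]
  constructor
  · intro h x hx
    have h' : ∀ y ∈ List.dropWhile (fun c => (['/'] : List Char).contains c) t,
        (fun c => (['/'] : List Char).contains c) y = true := by
      intro y hy; exact h y (List.mem_reverse.mpr hy)
    have := (dropWhile_forall_iff _ t).mp h' x hx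
    simpa using this
  · intro h x hx
    have hxt : x ∈ t :=
      (List.dropWhile_sublist (l := t) (fun c => (['/'] : List Char).contains c)).mem
        (List.mem_reverse.mp hx)
    simp [h x hxt]

lemma Ptok_eq_any (t : List Char) : Ptok t = t.any (fun c => c != '/') := by
  rcases hany : t.any (fun c => c != '/') with _ | _
  · have hall : ∀ x ∈ t, x = '/' := by
      intro x hx; simpa using List.any_eq_false.mp hany x hx
    have h0 : PySem.Chars.stripChars t ['/'] = [] := (stripChars_slash t).mpr hall
    simp [Ptok, h0]
  · have h0 : PySem.Chars.stripChars t ['/'] ≠ [] := by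
      rw [Ne, stripChars_slash]
      intro hall
      rcases List.any_eq_true.mp hany with ⟨x, hx, hxn⟩
      exact absurd (hall x hx) (by simpa using hxn)
    simp [Ptok, h0]

-- the key scan/split correspondence for the letters counter
lemma letters_go (s : List Char) : ∀ (cur : List Char) (acc : List (List Char)) (st : MorseSt),
    st.inTok = !cur.isEmpty →
    st.hasNS = cur.any (fun c => c != '/') →
    st.letters = ((acc.filter Ptok).length : Int) →
    (if (s.foldl morseStep st).inTok && (s.foldl morseStep st).hasNS
       then (s.foldl morseStep st).letters + 1 else (s.foldl morseStep st).letters)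
    = (((PySem.Chars.split₀.go s cur acc).filter Ptok).length : Int) := by
  induction s with
  | nil =>
      intro cur acc st h1 h2 h3
      cases cur with
      | nil =>
          have h1' : st.inTok = false := by simpa using h1
          simp [PySem.Chars.split₀.go, h1', h3]
      | cons x xs =>
          have h1' : st.inTok = true := by simpa using h1
          have hP : Ptok (x :: xs).reverse = st.hasNS := by
            rw [Ptok_eq_any, List.any_reverse, h2]
          have hgo : PySem.Chars.split₀.go [] (x :: xs) acc
              = ((x :: xs).reverse :: acc).reverse := by
            simp [PySem.Chars.split₀.go]
          rw [List.foldl_nil, hgo, List.filter_reverse, List.length_reverse,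
            List.filter_cons, hP, h1']
          rcases hns : st.hasNS with _ | _
          · simp [h3]
          · simp [h3]
  | cons c rest ih =>
      intro cur acc st h1 h2 h3
      rw [List.foldl_cons]
      by_cases hc : PySem.Chars.isspace c
      · have hin : (morseStep st c).inTok = false := by simp [morseStep, hc]
        have hns : (morseStep st c).hasNS = false := by simp [morseStep, hc]
        have hle : (morseStep st c).letters
            = if st.inTok && st.hasNS then st.letters + 1 else st.letters := by
          simp [morseStep, hc]
        cases cur with
        | nil =>
            have h1' : st.inTok = false := by simpa using h1
            have hgo : PySem.Chars.split₀.go (c :: rest) [] acc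
                = PySem.Chars.split₀.go rest [] acc := by
              simp [PySem.Chars.split₀.go, hc]
            rw [hgo]
            exact ih [] acc _ (by simp [hin]) (by simp [hns])
              (by rw [hle, h1']; simpa using h3)
        | cons x xs =>
            have h1' : st.inTok = true := by simpa using h1
            have hP : Ptok (x :: xs).reverse = st.hasNS := by
              rw [Ptok_eq_any, List.any_reverse, h2]
            have hgo : PySem.Chars.split₀.go (c :: rest) (x :: xs) acc
                = PySem.Chars.split₀.go rest [] ((x :: xs).reverse :: acc) := by
              simp [PySem.Chars.split₀.go, hc]
            rw [hgo]
            refine ih [] _ _ (by simp [hin]) (by simp [hns]) ?_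
            rw [hle, List.filter_cons, hP, h1']
            rcases hns2 : st.hasNS with _ | _
            · simp [h3]
            · simp [h3]
      · have hin : (morseStep st c).inTok = true := by simp [morseStep, hc]
        have hns : (morseStep st c).hasNS = (c :: cur).any (fun d => d != '/') := by
          by_cases hcs : c = '/'
          · subst hcs; simp [morseStep, hc, h2]
          · simp [morseStep, hc, hcs]
        have hle : (morseStep st c).letters = st.letters := by simp [morseStep, hc]
        have hgo : PySem.Chars.split₀.go (c :: rest) cur acc
            = PySem.Chars.split₀.go rest (c :: cur) acc := by
          simp [PySem.Chars.split₀.go, hc]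
        rw [hgo]
        exact ih (c :: cur) acc _ (by simp [hin]) hns (by rw [hle]; exact h3)

-- (strip l) empty iff everything is whitespace
lemma strip_eq_nil_iff (l : List Char) :
    PySem.Chars.strip l = [] ↔ ∀ x ∈ l, PySem.Chars.isspace x := by
  have hdef : PySem.Chars.strip l =
      (List.dropWhile PySem.Chars.isspace
        ((List.dropWhile PySem.Chars.isspace l).reverse)).reverse := rfl
  rw [hdef, List.reverse_eq_nil_iff, List.dropWhile_eq_nil_iff]
  constructor
  · intro h
    have h' : ∀ y ∈ List.dropWhile PySem.Chars.isspace l, PySem.Chars.isspace y = true := by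
      intro y hy; exact h y (List.mem_reverse.mpr hy)
    exact (dropWhile_forall_iff _ l).mp h'
  · intro h x hx
    exact h x ((List.dropWhile_sublist (l := l) PySem.Chars.isspace).mem
      (List.mem_reverse.mp hx))

-- String emptiness vs toList
lemma str_eq_empty_iff (s : String) : s = "" ↔ s.toList = [] := by
  rw [← String.toList_inj]
  simp

-- ===== VERDICT (by name: the statement is the Claim_ definition above) =====
theorem get_morse_stats_spec : Claim_equal_get_morse_stats := by
  intro morse _
  unfold Spec_get_morse_stats
  have hletters := letters_go morse.toList [] [] ⟨0, 0, 0, 0, false, false, false⟩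
    (by simp) (by simp) (by simp)
  have hdots := fold_dots morse.toList ⟨0, 0, 0, 0, false, false, false⟩
  have hdashes := fold_dashes morse.toList ⟨0, 0, 0, 0, false, false, false⟩
  have hslashes := fold_slashes morse.toList ⟨0, 0, 0, 0, false, false, false⟩
  have hseen := fold_seen morse.toList ⟨0, 0, 0, 0, false, false, false⟩
  have hcountA : ∀ c : Char, PySem.Str.count morse (String.ofList [c]) = morse.toList.count c := by
    intro c
    rw [PySem.Str.count_eq]
    simpa using count_singleton morse.toList c
  have hfilter :
      ((PySem.Str.split₀ morse).filter (fun m => PySem.Str.stripChars m "/" != "")).length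
      = ((PySem.Chars.split₀ morse.toList).filter Ptok).length := by
    rw [← PySem.Str.split₀_map_toList, List.filter_map, List.length_map]
    congr 1
    apply List.filter_congr
    intro m _
    have hb : (PySem.Str.stripChars m "/").toList = PySem.Chars.stripChars m.toList ['/'] := by
      simpa using PySem.Str.toList_stripChars m "/"
    rcases hmm : PySem.Chars.stripChars m.toList ['/'] with _ | ⟨y, ys⟩
    · have hz : PySem.Str.stripChars m "/" = "" := by
        rw [str_eq_empty_iff, hb, hmm]
      simp [Function.comp, Ptok, hz, hmm]
    · have hz : PySem.Str.stripChars m "/" ≠ "" := by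
        rw [Ne, str_eq_empty_iff, hb, hmm]; simp
      have hbt : (PySem.Str.stripChars m "/" != "") = true := by
        simpa [bne_iff_ne] using hz
      simp [Function.comp, Ptok, hmm, hbt]
  have hstrip : (PySem.Str.strip morse != "") =
      morse.toList.any (fun c => !PySem.Chars.isspace c) := by
    rcases hany : morse.toList.any (fun c => !PySem.Chars.isspace c) with _ | _
    · have hall : ∀ x ∈ morse.toList, PySem.Chars.isspace x := by
        intro x hx
        have := List.any_eq_false.mp hany x hx
        simpa using this
      have hz : PySem.Str.strip morse = "" := by
        rw [str_eq_empty_iff, PySem.Str.toList_strip]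
        exact (strip_eq_nil_iff _).mpr hall
      simp [hz]
    · have hz : PySem.Str.strip morse ≠ "" := by
        rw [Ne, str_eq_empty_iff, PySem.Str.toList_strip, strip_eq_nil_iff]
        intro hall
        rcases List.any_eq_true.mp hany with ⟨x, hx, hxn⟩
        simp [hall x hx] at hxn
      simp [bne_iff_ne, hz]
  have hdotS : PySem.Str.count morse "." = morse.toList.count '.' := by
    have := hcountA '.'
    simpa using this
  have hdashS : PySem.Str.count morse "-" = morse.toList.count '-' := by
    have := hcountA '-'
    simpa using this
  have hslashS : PySem.Str.count morse "/" = morse.toList.count '/' := by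
    have := hcountA '/'
    simpa using this
  show get_morse_stats morse = get_morse_stats_alt morse
  unfold get_morse_stats get_morse_stats_alt
  simp only [List.cons.injEq, Prod.mk.injEq, true_and, and_true]
  refine ⟨?_, ?_, ?_, ?_, ?_⟩
  · rw [hdotS, hdots]; simp
  · rw [hdashS, hdashes]; simp
  · rw [hfilter]
    rw [show PySem.Chars.split₀ morse.toList = PySem.Chars.split₀.go morse.toList [] []
      from rfl]
    exact hletters.symm
  · rw [hstrip, hseen]
    simp only [MorseSt.seen, Bool.false_or]
    rcases hany : morse.toList.any (fun c => !PySem.Chars.isspace c) with _ | _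
    · simp [hany]
    · simp [hany, count_singleton, hslashes]
  · rw [hdotS, hdashS, hdots, hdashes]; simp
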